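-- pv_equiv track=rewrite | github.com/michaelrendier/Ptolemy | Philadelphos/Ainulindale/first_age/FA_smnnip_hyperindex.py | decode_fano
-- ===== SOURCE A (Python) =====
-- from typing import List, Tuple, Optional, Dict, Any
--
-- FANO_BASE: int = 7
--
-- def decode_fano(idx: int, length: int) -> List[int]:
--     """
--     Decode Fano index back to sequence of generator indices (0..6).
--     """
--     components = []
--     remaining = idx
--     for _ in range(length):
--         components.append(remaining % FANO_BASE)
--         remaining //= FANO_BASE
--     components.reverse()
--     return components
-- ===== SOURCE B (Python) =====
-- FANO_BASE: int = 7
--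
-- def decode_fano(idx, length):
--     """Divide and conquer: one divmod by FANO_BASE**half splits the number into the
--     high and low halves of the digit string; recurse on each half and concatenate.
--     Correct because floored divmod gives idx = hi*7**half + lo with 0 <= lo < 7**half,
--     so hi carries exactly the upper digits and lo the lower ones (also for negative idx)."""
--     if length <= 0:
--         return []
--     if length == 1:
--         return [idx % FANO_BASE]
--     half = length // 2
--     hi, lo = divmod(idx, FANO_BASE ** half)
--     return decode_fano(hi, length - half) + decode_fano(lo, half)
-- ===== Notes on version B (the rewrite author's own statement) =====
-- stated objective: alternative
-- what changed: B replaces A's linear loop (running remainder updated by //=7, append each digit, then reverse) with a divide-and-conquer recursion: one divmod by 7**(length//2) splits the number into the high and low halves of the digit string, each decoded recursively and concatenated most-significant first.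
import Mathlib
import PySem

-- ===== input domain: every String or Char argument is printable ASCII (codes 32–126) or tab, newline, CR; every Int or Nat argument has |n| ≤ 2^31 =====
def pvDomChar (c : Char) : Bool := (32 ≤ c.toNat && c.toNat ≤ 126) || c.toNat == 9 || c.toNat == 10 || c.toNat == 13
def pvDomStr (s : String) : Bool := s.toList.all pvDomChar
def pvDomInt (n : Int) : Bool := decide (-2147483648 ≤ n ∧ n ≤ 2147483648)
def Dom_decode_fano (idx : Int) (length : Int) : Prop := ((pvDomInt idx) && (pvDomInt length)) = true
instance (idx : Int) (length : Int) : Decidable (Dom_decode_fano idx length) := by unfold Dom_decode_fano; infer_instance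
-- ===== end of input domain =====

-- B decodes by divide and conquer: one divmod by 7^(length//2) splits the digit string into
-- its high and low halves, recursing on each — instead of A's linear remainder loop plus reverse
-- (objective: alternative).

-- ===== PORT A =====
-- A: append remaining % 7 while flooring remaining by 7, then reverse.
def decode_fano (idx : Int) (length : Int) : List Int :=
  let s := (PySem.List.pyRange 0 length 1).foldl
    (fun (st : List Int × Int) _ =>
      (st.1 ++ [PySem.Int.mod st.2 7], PySem.Int.floordiv st.2 7))
    ([], idx)
  s.1.reverse

-- termination helper for the B port (cited by its decreasing_by)
theorem pv_half_bounds (n : Int) (h : 2 ≤ n) :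
    1 ≤ PySem.Int.floordiv n 2 ∧ PySem.Int.floordiv n 2 < n := by
  show 1 ≤ Int.fdiv n 2 ∧ Int.fdiv n 2 < n
  rw [Int.fdiv_eq_ediv]
  constructor <;> omega

-- ===== PORT B =====
-- B: if length<=0: []; if length==1: [idx % 7]; else split with hi, lo = divmod(idx, 7**half)
-- and recurse on both halves. half = length//2 ≥ 1, so `.toNat` on the exponent is exact.
def decode_fano_alt (idx : Int) (length : Int) : List Int :=
  if h0 : length ≤ 0 then []
  else if h1 : length = 1 then [PySem.Int.mod idx 7]
  else
    let half := PySem.Int.floordiv length 2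
    let p := (7 : Int) ^ half.toNat
    decode_fano_alt (PySem.Int.floordiv idx p) (length - half) ++
      decode_fano_alt (PySem.Int.mod idx p) half
termination_by length.toNat
decreasing_by
  · have := pv_half_bounds length (by omega)
    omega
  · have := pv_half_bounds length (by omega)
    omega

-- ===== PRECONDITION & SPEC =====
def Spec_decode_fano (idx : Int) (length : Int) (out : List Int) : Prop := out = decode_fano_alt idx length
instance (idx : Int) (length : Int) (out : List Int) : Decidable (Spec_decode_fano idx length out) := by unfold Spec_decode_fano; infer_instance

-- ===== CLAIM (what is proved, stated in full; the proofs are below) =====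
def Claim_equal_decode_fano : Prop := ∀ (idx : Int) (length : Int), Dom_decode_fano idx length → Spec_decode_fano idx length (decode_fano idx length)

-- ===== LEMMAS AND PROOFS =====
def pvDigit (idx : Int) (j : Nat) : Int :=
  PySem.Int.mod (PySem.Int.floordiv idx ((7 : Int) ^ j)) 7

theorem pv_fmod7 (x : Int) : Int.fmod x 7 = Int.emod x 7 := by
  rw [Int.fmod_eq_emod]
  simp
  rfl

theorem pvA_fold (l : List Int) (acc : List Int) (r : Int) :
    (l.foldl
      (fun (st : List Int × Int) _ =>
        (st.1 ++ [PySem.Int.mod st.2 7], PySem.Int.floordiv st.2 7))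
      (acc, r)).1
      = acc ++ (List.range l.length).map (fun j => pvDigit r j) := by
  induction l generalizing acc r with
  | nil => simp
  | cons x l ih =>
      rw [List.foldl_cons, ih]
      rw [List.length_cons, List.range_succ_eq_map, List.map_cons, List.map_map]
      have h1 : ((fun j => pvDigit r j) ∘ Nat.succ)
          = fun j => pvDigit (PySem.Int.floordiv r 7) j := by
        funext j
        show pvDigit r (j + 1) = _
        unfold pvDigit
        show Int.fmod (Int.fdiv r (7 ^ (j+1))) 7
          = Int.fmod (Int.fdiv (Int.fdiv r 7) (7 ^ j)) 7
        rw [Int.fdiv_fdiv_eq_fdiv_mul r (by norm_num) (by positivity), pow_succ']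
      rw [h1]
      have h2 : pvDigit r 0 = PySem.Int.mod r 7 := by
        unfold pvDigit; rw [pow_zero]; norm_num [PySem.Int.floordiv]
      rw [h2]
      simp [List.append_assoc]

theorem pv_reverse_map_range {f : Nat → Int} (n : Nat) :
    ((List.range n).map f).reverse = (List.range n).map (fun i => f (n - 1 - i)) := by
  apply List.ext_getElem
  · simp
  · intro i h1 h2
    simp only [List.length_map, List.length_range] at h1 h2
    rw [List.getElem_reverse]
    simp only [List.getElem_map, List.getElem_range, List.length_map, List.length_range]

-- the j-th digit of the high half: dividing by 7^k shifts digit positions down by k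
theorem pvDigit_fdiv (idx : Int) (k j : Nat) :
    pvDigit (PySem.Int.floordiv idx ((7 : Int) ^ k)) j = pvDigit idx (j + k) := by
  unfold pvDigit
  show Int.fmod (Int.fdiv (Int.fdiv idx (7 ^ k)) (7 ^ j)) 7
    = Int.fmod (Int.fdiv idx (7 ^ (j + k))) 7
  rw [Int.fdiv_fdiv_eq_fdiv_mul idx (by positivity) (by positivity), pow_add, mul_comm]

-- the j-th digit of the low half: taking idx mod 7^k keeps digits below position k
theorem pvDigit_fmod (idx : Int) {k j : Nat} (h : j < k) :
    pvDigit (PySem.Int.mod idx ((7 : Int) ^ k)) j = pvDigit idx j := by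
  unfold pvDigit
  show Int.fmod (Int.fdiv (Int.fmod idx (7 ^ k)) (7 ^ j)) 7
    = Int.fmod (Int.fdiv idx (7 ^ j)) 7
  have h2 : (7 : Int) ^ (k - j) * 7 ^ j = 7 ^ k := by
    rw [← pow_add]; congr 1; omega
  have hsplit : Int.fmod idx (7 ^ k)
      = idx + -Int.fdiv idx (7 ^ k) * 7 ^ (k - j) * 7 ^ j := by
    have h1 := Int.mul_fdiv_add_fmod idx ((7 : Int) ^ k)
    have h1' : Int.fmod idx (7 ^ k) = idx - 7 ^ k * Int.fdiv idx (7 ^ k) := by linarith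
    rw [h1', ← h2]; ring
  rw [hsplit, Int.add_mul_fdiv_right _ _ (by positivity)]
  have h3 : (-Int.fdiv idx (7 ^ k) * 7 ^ (k - j) : Int)
      = -Int.fdiv idx (7 ^ k) * 7 ^ (k - j - 1) * 7 := by
    rw [mul_assoc, ← pow_succ]; congr 2; omega
  have key : ∀ (x c : Int), (x + c * 7).fmod 7 = x.fmod 7 := by
    intro x c; rw [pv_fmod7, pv_fmod7]; exact Int.add_mul_emod_self_right x c 7
  rw [h3, key]

theorem pvB_closed (n : Nat) : ∀ (length idx : Int), length.toNat = n →
    decode_fano_alt idx length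
      = (List.range n).map (fun i => pvDigit idx (n - 1 - i)) := by
  induction n using Nat.strong_induction_on with
  | _ n ih =>
    intro length idx hn
    by_cases h0 : length ≤ 0
    · rw [decode_fano_alt, dif_pos h0]
      have : n = 0 := by omega
      subst this; simp
    · by_cases h1 : length = 1
      · subst h1
        rw [decode_fano_alt]
        norm_num
        have hn1 : n = 1 := by omega
        subst hn1
        simp [pvDigit, PySem.Int.floordiv, PySem.Int.mod, Int.fdiv_one]
        rw [pv_fmod7]
        rfl
      · have h2 : 2 ≤ length := by omega
        have hk := pv_half_bounds length h2
        rw [decode_fano_alt, dif_neg h0, dif_neg h1]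
        simp only []
        set k := PySem.Int.floordiv length 2 with hkdef
        set kn := k.toNat with hkn
        set m := (length - k).toNat with hm
        have hk1 : 1 ≤ kn := by omega
        have hmn : m + kn = n := by omega
        have hm1 : 1 ≤ m := by omega
        rw [ih m (by omega) (length - k) _ rfl, ih kn (by omega) k _ rfl]
        rw [← hmn, List.range_add, List.map_append, List.map_map]
        congr 1
        · apply List.map_congr_left
          intro i hi
          simp only [List.mem_range] at hi
          rw [pvDigit_fdiv]
          congr 1
          omega
        · apply List.map_congr_left
          intro i hi
          simp only [List.mem_range] at hi
          simp only [Function.comp]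
          rw [pvDigit_fmod idx (by omega : kn - 1 - i < kn)]
          congr 1
          omega

theorem pv_main (idx length : Int) : decode_fano idx length = decode_fano_alt idx length := by
  simp only [decode_fano, PySem.List.pyRange_one]
  rw [pvA_fold, List.nil_append, List.length_map, List.length_range, pv_reverse_map_range]
  rw [pvB_closed (length - 0).toNat length idx (by omega)]

-- ===== VERDICT (by name: the statement is the Claim_ definition above) =====
theorem decode_fano_spec : Claim_equal_decode_fano := by
  intro idx length _
  exact pv_main idx length
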